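-- pv_equiv track=rewrite | github.com/ryandoro/personal-training-app | helpers.py | filter_leg_press_rows
-- ===== SOURCE A (Python) =====
-- LEG_PRESS_MACHINE_PREFIXES = {
--     "LIFE_FITNESS": "life fitness leg press machine",
--     "HAMMER_STRENGTH": "hammer strength leg press machine",
-- }
--
-- def identify_leg_press_machine(name: str | None) -> str | None:
--     """Return the normalized machine key for any leg press variation."""
--     if not name:
--         return None
--     normalized = name.strip().lower()
--     for key, prefix in LEG_PRESS_MACHINE_PREFIXES.items():
--         if normalized.startswith(prefix):
--             return key
--     return None
--
-- def filter_leg_press_rows(rows, forced_machine: str | None = None):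
--     """
--     Remove rows that belong to both machine families, keeping only the requested
--     machine (or the first encountered machine when not forced).
--     """
--     machine_key = forced_machine
--     filtered = []
--     for row in rows or []:
--         machine = identify_leg_press_machine(row[1] if len(row) > 1 else None)
--         if not machine:
--             filtered.append(row)
--             continue
--         if machine_key and machine != machine_key:
--             continue
--         if not machine_key:
--             machine_key = machine
--         filtered.append(row)
--     return filtered, machine_key
-- ===== SOURCE B (Python) =====
-- LEG_PRESS_MACHINE_PREFIXES = {
--     "LIFE_FITNESS": "life fitness leg press machine",
--     "HAMMER_STRENGTH": "hammer strength leg press machine",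
-- }
--
-- def identify_leg_press_machine(name):
--     if not name:
--         return None
--     normalized = name.strip().lower()
--     for key, prefix in LEG_PRESS_MACHINE_PREFIXES.items():
--         if normalized.startswith(prefix):
--             return key
--     return None
--
-- def filter_leg_press_rows(rows, forced_machine=None):
--     rows = list(rows or [])
--     if forced_machine:
--         machine_key = forced_machine
--     else:
--         machine_key = next(
--             (m for m in (identify_leg_press_machine(r[1] if len(r) > 1 else None) for r in rows) if m),
--             forced_machine,
--         )
--     filtered = [
--         r for r in rows
--         if not (m := identify_leg_press_machine(r[1] if len(r) > 1 else None)) or m == machine_key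
--     ]
--     return filtered, machine_key
-- ===== Notes on version B (the rewrite author's own statement) =====
-- stated objective: simpler
-- what changed: A threads one mutable machine_key through a single loop with continue-branches; B resolves the machine key first (forced if truthy, else the first identified machine via next, falling back to forced_machine) and then filters the rows in a separate comprehension pass.
import Mathlib
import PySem

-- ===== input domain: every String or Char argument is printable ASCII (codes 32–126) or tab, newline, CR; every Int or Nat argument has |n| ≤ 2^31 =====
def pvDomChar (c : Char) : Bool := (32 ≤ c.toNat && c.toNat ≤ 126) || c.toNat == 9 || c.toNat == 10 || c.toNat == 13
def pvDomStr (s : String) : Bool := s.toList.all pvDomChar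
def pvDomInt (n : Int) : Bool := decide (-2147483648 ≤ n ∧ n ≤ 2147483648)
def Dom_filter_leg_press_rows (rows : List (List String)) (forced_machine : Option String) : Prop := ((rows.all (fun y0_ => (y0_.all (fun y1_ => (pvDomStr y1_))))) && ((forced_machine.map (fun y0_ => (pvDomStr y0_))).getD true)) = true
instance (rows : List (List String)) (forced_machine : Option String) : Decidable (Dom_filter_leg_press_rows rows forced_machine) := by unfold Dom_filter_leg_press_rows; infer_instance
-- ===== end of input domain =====

-- B resolves the machine key in one pass up front and filters in a second pass (simpler decomposition); same return value as A.

-- ===== PORT A =====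
-- Python truthiness of an optional string: None and "" are falsy.
def pyTruthyOptStr (o : Option String) : Bool :=
  match o with
  | none => false
  | some s => !(s == "")

-- `row[1] if len(row) > 1 else None` (shared by both Pythons verbatim)
def pvSecond (row : List String) : Option String :=
  if 1 < row.length then PySem.List.pyGet? row 1 else none

def identify_leg_press_machine (name : Option String) : Option String :=
  if !pyTruthyOptStr name then none
  else
    let normalized := PySem.Str.lower (PySem.Str.strip (name.getD ""))
    if PySem.Str.startswith normalized "life fitness leg press machine" then some "LIFE_FITNESS"
    else if PySem.Str.startswith normalized "hammer strength leg press machine" then some "HAMMER_STRENGTH"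
    else none

-- the body of A's single loop
def pvStepA (st : List (List String) × Option String) (row : List String) :
    List (List String) × Option String :=
  let machine := identify_leg_press_machine (pvSecond row)
  if !pyTruthyOptStr machine then (st.1 ++ [row], st.2)
  else if pyTruthyOptStr st.2 && !(machine == st.2) then st
  else (st.1 ++ [row], if !pyTruthyOptStr st.2 then machine else st.2)

def filter_leg_press_rows (rows : List (List String)) (forced_machine : Option String) :
    List (List String) × Option String :=
  rows.foldl pvStepA ([], forced_machine)

-- ===== PORT B =====
-- keep a row iff its machine is falsy or equals the resolved key
def pvKeepB (machine_key : Option String) (r : List String) : Bool :=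
  let m := identify_leg_press_machine (pvSecond r)
  !pyTruthyOptStr m || m == machine_key

def filter_leg_press_rows_alt (rows : List (List String)) (forced_machine : Option String) :
    List (List String) × Option String :=
  let machine_key :=
    if pyTruthyOptStr forced_machine then forced_machine
    else
      match ((rows.map (fun r => identify_leg_press_machine (pvSecond r))).filter pyTruthyOptStr).head? with
      | some m => m
      | none => forced_machine
  (rows.filter (pvKeepB machine_key), machine_key)

-- ===== PRECONDITION & SPEC =====
def Spec_filter_leg_press_rows (rows : List (List String)) (forced_machine : Option String) (out : List (List String) × Option String) : Prop := out = filter_leg_press_rows_alt rows forced_machine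
instance (rows : List (List String)) (forced_machine : Option String) (out : List (List String) × Option String) : Decidable (Spec_filter_leg_press_rows rows forced_machine out) := by unfold Spec_filter_leg_press_rows; infer_instance

-- ===== CLAIM (what is proved, stated in full; the proofs are below) =====
def Claim_equal_filter_leg_press_rows : Prop := ∀ (rows : List (List String)) (forced_machine : Option String), Dom_filter_leg_press_rows rows forced_machine → Spec_filter_leg_press_rows rows forced_machine (filter_leg_press_rows rows forced_machine)

-- ===== LEMMAS AND PROOFS =====

-- A's fold with a truthy key never changes the key and filters with pvKeepB of that key
lemma foldA_truthy (rows : List (List String)) :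
    ∀ (acc : List (List String)) (mk : Option String), pyTruthyOptStr mk = true →
      rows.foldl pvStepA (acc, mk) = (acc ++ rows.filter (pvKeepB mk), mk) := by
  induction rows with
  | nil => intro acc mk _; simp
  | cons r rest ih =>
    intro acc mk hmk
    simp only [List.foldl_cons, List.filter_cons]
    by_cases hm : pyTruthyOptStr (identify_leg_press_machine (pvSecond r)) = true
    · by_cases heq : identify_leg_press_machine (pvSecond r) == mk
      · have : pvStepA (acc, mk) r = (acc ++ [r], mk) := by
          simp [pvStepA, hm, heq, hmk]
        rw [this, ih _ _ hmk]
        simp [pvKeepB, heq]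
      · have : pvStepA (acc, mk) r = (acc, mk) := by
          simp [pvStepA, hm, hmk]
          simp at heq
          exact fun h => absurd h heq
        rw [this, ih _ _ hmk]
        have : pvKeepB mk r = false := by
          simp [pvKeepB, hm]
          simpa using heq
        simp [this]
    · have hstep : pvStepA (acc, mk) r = (acc ++ [r], mk) := by
        simp [pvStepA, hm]
      rw [hstep, ih _ _ hmk]
      have : pvKeepB mk r = true := by simp [pvKeepB, hm]
      simp [this]

-- A's fold from a falsy key equals B's two-pass computation
lemma foldA_falsy (rows : List (List String)) (mk : Option String)
    (hmk : pyTruthyOptStr mk = false) :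
    rows.foldl pvStepA ([], mk) = filter_leg_press_rows_alt rows mk := by
  induction rows with
  | nil => simp [filter_leg_press_rows_alt, hmk]
  | cons r rest ih =>
    by_cases hm : pyTruthyOptStr (identify_leg_press_machine (pvSecond r)) = true
    · -- the first machine row: key resolves to this machine
      have hstep : pvStepA ([], mk) r = ([r], identify_leg_press_machine (pvSecond r)) := by
        simp [pvStepA, hm, hmk]
      simp only [List.foldl_cons, hstep]
      have h1 : rest.foldl pvStepA ([r], identify_leg_press_machine (pvSecond r))
          = ([r] ++ rest.filter (pvKeepB (identify_leg_press_machine (pvSecond r))),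
             identify_leg_press_machine (pvSecond r)) := foldA_truthy rest [r] _ hm
      rw [h1]
      simp [filter_leg_press_rows_alt, hmk, hm, pvKeepB]
    · -- a machine-less row: kept, key unresolved, recurse
      have hstep : pvStepA ([], mk) r = ([r], mk) := by simp [pvStepA, hm]
      simp only [List.foldl_cons, hstep]
      have hacc : ∀ (rs : List (List String)) (acc : List (List String)) (st : Option String),
          rs.foldl pvStepA (acc, st) = (acc ++ (rs.foldl pvStepA ([], st)).1, (rs.foldl pvStepA ([], st)).2) := by
        intro rs
        induction rs with
        | nil => intro acc st; simp
        | cons x xs ihx =>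
          intro acc st
          simp only [List.foldl_cons]
          have hx : pvStepA (acc, st) x = ((acc ++ ((pvStepA ([], st) x).1)), (pvStepA ([], st) x).2) := by
            simp [pvStepA]
            split_ifs <;> simp
          rw [hx, ihx, ihx ((pvStepA ([], st) x).1)]
          simp
      rw [hacc, ih]
      simp [filter_leg_press_rows_alt, hmk, hm, pvKeepB]

-- ===== VERDICT (by name: the statement is the Claim_ definition above) =====
theorem filter_leg_press_rows_spec : Claim_equal_filter_leg_press_rows := by
  intro rows forced _
  unfold Spec_filter_leg_press_rows filter_leg_press_rows
  by_cases h : pyTruthyOptStr forced = true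
  · rw [foldA_truthy rows [] forced h]
    simp [filter_leg_press_rows_alt, h]
  · exact foldA_falsy rows forced (by simpa using h)
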